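-- pv_equiv track=rewrite | github.com/jakeibeemassa0908/cosc4315hw1 | HW1/BigInt.py | _nodes_normalize
-- ===== SOURCE A (Python) =====
-- def _nodes_normalize(nodes, carry=0, acc=[]):
--     if not nodes:
--         if carry > 0:
--             return [carry] + acc
--         else:
--             return acc
--     else:
--         num = nodes[-1] + carry
--         new_num = num % 10
--         new_carry = num // 10
--         return _nodes_normalize(nodes[:-1], new_carry, [new_num] + acc)
-- ===== SOURCE B (Python) =====
-- def _nodes_normalize(nodes, carry=0, acc=[]):
--     digits = []
--     for d in reversed(nodes):
--         num = d + carry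
--         digits.append(num % 10)
--         carry = num // 10
--     digits.reverse()
--     if carry > 0:
--         return [carry] + digits + acc
--     return digits + acc
-- ===== Notes on version B (the rewrite author's own statement) =====
-- stated objective: faster
-- what changed: Replaced A's recursion that copies nodes[:-1] and rebuilds [new_num]+acc on every step (quadratic list copying) by a single iterative pass over reversed(nodes) with a running carry that appends digits to one list, reversed once at the end.
import Mathlib
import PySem

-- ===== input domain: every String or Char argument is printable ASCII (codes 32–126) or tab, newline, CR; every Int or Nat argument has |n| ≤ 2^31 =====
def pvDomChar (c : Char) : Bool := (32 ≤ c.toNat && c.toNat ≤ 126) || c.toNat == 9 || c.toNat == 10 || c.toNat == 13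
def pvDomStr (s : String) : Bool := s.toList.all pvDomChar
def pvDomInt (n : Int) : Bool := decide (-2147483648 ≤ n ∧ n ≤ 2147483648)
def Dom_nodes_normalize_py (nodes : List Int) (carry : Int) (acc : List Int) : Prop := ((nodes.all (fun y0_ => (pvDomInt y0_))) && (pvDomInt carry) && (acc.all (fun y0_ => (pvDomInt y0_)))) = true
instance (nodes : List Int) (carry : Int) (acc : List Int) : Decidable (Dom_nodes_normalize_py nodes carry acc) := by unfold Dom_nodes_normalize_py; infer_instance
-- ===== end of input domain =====

-- B replaces A's quadratic recursion (copies nodes[:-1] and rebuilds [new_num]+acc each step)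
-- by one linear pass over reversed(nodes) with a running carry; return values agree everywhere.

-- ===== PORT A =====
-- recursion on nodes[:-1]; nodes[-1] via pyGet?: exact, since nodes ≠ [] in that branch (getD 0 never used)
def nodes_normalize_py (nodes : List Int) (carry : Int) (acc : List Int) : List Int :=
  if nodes = [] then
    if carry > 0 then carry :: acc else acc
  else
    let num := (PySem.List.pyGet? nodes (-1)).getD 0 + carry
    let new_num := PySem.Int.mod num 10
    let new_carry := PySem.Int.floordiv num 10
    nodes_normalize_py (PySem.List.slice nodes none (some (-1))) new_carry (new_num :: acc)
termination_by nodes.length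
decreasing_by
  simp only [PySem.List.slice_to_neg_one, List.length_dropLast]
  rename_i h
  have : nodes.length ≠ 0 := fun h0 => h (List.eq_nil_of_length_eq_zero h0)
  omega

-- ===== PORT B =====
-- the loop body of Source B: num = d + carry; digits.append(num % 10); carry = num // 10
def nnStep (p : List Int × Int) (d : Int) : List Int × Int :=
  (p.1 ++ [PySem.Int.mod (d + p.2) 10], PySem.Int.floordiv (d + p.2) 10)

def nodes_normalize_py_alt (nodes : List Int) (carry : Int) (acc : List Int) : List Int :=
  let r := nodes.reverse.foldl nnStep ([], carry)
  let digits := r.1.reverse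
  if r.2 > 0 then r.2 :: (digits ++ acc) else digits ++ acc

-- ===== PRECONDITION & SPEC =====
def Spec_nodes_normalize_py (nodes : List Int) (carry : Int) (acc : List Int) (out : List Int) : Prop := out = nodes_normalize_py_alt nodes carry acc
instance (nodes : List Int) (carry : Int) (acc : List Int) (out : List Int) : Decidable (Spec_nodes_normalize_py nodes carry acc out) := by unfold Spec_nodes_normalize_py; infer_instance

-- ===== CLAIM (what is proved, stated in full; the proofs are below) =====
def Claim_equal_nodes_normalize_py : Prop := ∀ (nodes : List Int) (carry : Int) (acc : List Int), Dom_nodes_normalize_py nodes carry acc → Spec_nodes_normalize_py nodes carry acc (nodes_normalize_py nodes carry acc)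

-- ===== LEMMAS AND PROOFS =====

-- the fold's digit list only grows on the right: initial digits factor out
theorem nnStep_foldl_shift' (rev : List Int) (ds : List Int) (c : Int) :
    rev.foldl nnStep (ds, c) =
      (ds ++ (rev.foldl nnStep ([], c)).1, (rev.foldl nnStep ([], c)).2) := by
  induction rev generalizing ds c with
  | nil => simp
  | cons x xs ih =>
    simp only [List.foldl_cons]
    rw [show nnStep (ds, c) x
          = (ds ++ [PySem.Int.mod (x + c) 10], PySem.Int.floordiv (x + c) 10) from rfl,
        show nnStep (([] : List Int), c) x
          = ([PySem.Int.mod (x + c) 10], PySem.Int.floordiv (x + c) 10) from rfl]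
    rw [ih (ds ++ [PySem.Int.mod (x + c) 10]), ih [PySem.Int.mod (x + c) 10]]
    simp

theorem nodes_normalize_eq (nodes : List Int) (carry : Int) (acc : List Int) :
    nodes_normalize_py nodes carry acc = nodes_normalize_py_alt nodes carry acc := by
  induction nodes using List.reverseRecOn generalizing carry acc with
  | nil =>
    rw [nodes_normalize_py]
    simp [nodes_normalize_py_alt]
  | append_singleton ys x ih =>
    rw [nodes_normalize_py]
    have hne : ys ++ [x] ≠ [] := by simp
    rw [if_neg hne]
    simp only [PySem.List.pyGet?_neg_one_append_singleton, Option.getD_some,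
      PySem.List.slice_to_neg_one, List.dropLast_concat]
    rw [ih]
    simp only [nodes_normalize_py_alt, List.reverse_append, List.reverse_singleton,
      List.singleton_append, List.foldl_cons]
    rw [show nnStep (([] : List Int), carry) x
          = ([PySem.Int.mod (x + carry) 10], PySem.Int.floordiv (x + carry) 10) from rfl]
    rw [nnStep_foldl_shift' ys.reverse [PySem.Int.mod (x + carry) 10]
          (PySem.Int.floordiv (x + carry) 10)]
    simp [List.reverse_cons]

-- ===== VERDICT (by name: the statement is the Claim_ definition above) =====
theorem nodes_normalize_py_spec : Claim_equal_nodes_normalize_py := by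
  intro nodes carry acc _
  exact nodes_normalize_eq nodes carry acc
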